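-- pv_equiv track=rewrite | github.com/jerrykuo7727/QA-FGC-embeddings | scripts/prepare_bert_data.py | find_sublist
-- ===== SOURCE A (Python) =====
-- def find_sublist(a, b, order=-1):
--     if not b:
--         return -1
--     counter = 0
--     for i in range(len(a)-len(b)+1):
--         if a[i:i+len(b)] == b:
--             counter += 1
--             if counter > order:
--                 return i
--     return -1
-- ===== SOURCE B (Python) =====
-- def find_sublist(a, b, order=-1):
--     # Rolling window-sum filter: only compare the window with b when the sums agree.
--     if not b:
--         return -1
--     n, m = len(a), len(b)
--     if m > n:
--         return -1
--     target = sum(b)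
--     window = sum(a[:m])
--     counter = 0
--     for i in range(n - m + 1):
--         if window == target and a[i:i+m] == b:
--             counter += 1
--             if counter > order:
--                 return i
--         if i + m < n:
--             window += a[i + m] - a[i]
--     return -1
-- ===== Notes on version B (the rewrite author's own statement) =====
-- stated objective: alternative
-- what changed: B maintains a rolling window sum and performs the slice comparison only at positions where the window sum equals sum(b), instead of A's slice-and-compare at every position; it trades A's per-position slice for O(1) sum maintenance plus occasional verification.
import Mathlib
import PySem

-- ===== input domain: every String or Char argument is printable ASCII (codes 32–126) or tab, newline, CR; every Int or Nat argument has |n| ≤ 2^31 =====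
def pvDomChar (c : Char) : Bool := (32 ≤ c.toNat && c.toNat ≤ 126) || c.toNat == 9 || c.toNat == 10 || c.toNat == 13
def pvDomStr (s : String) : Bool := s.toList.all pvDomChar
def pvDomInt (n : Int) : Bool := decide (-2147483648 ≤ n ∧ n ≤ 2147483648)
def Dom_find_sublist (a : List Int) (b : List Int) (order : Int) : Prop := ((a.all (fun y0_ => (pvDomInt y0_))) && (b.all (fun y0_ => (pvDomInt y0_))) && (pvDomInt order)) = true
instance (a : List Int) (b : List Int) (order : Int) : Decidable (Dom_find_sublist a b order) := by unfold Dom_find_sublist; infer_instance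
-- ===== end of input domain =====

-- B replaces A's per-position slice comparison by a rolling window-sum filter: it compares the
-- window with b only at positions where the window sum equals sum(b); objective: alternative
-- algorithm (same worst-case cost, different mechanism).

-- ===== PORT A =====
-- the 'for i in range(...)' loop with early return, as recursion over the range list
def findSublistLoopA (a b : List Int) (order : Int) : List Int → Int → Int
  | [], _ => -1
  | i :: rest, counter =>
      if PySem.List.slice a (some i) (some (i + (b.length : Int))) = b then
        if counter + 1 > order then i
        else findSublistLoopA a b order rest (counter + 1)
      else findSublistLoopA a b order rest counter

def find_sublist (a : List Int) (b : List Int) (order : Int) : Int :=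
  if b = [] then -1
  else findSublistLoopA a b order
        (PySem.List.pyRange 0 ((a.length : Int) - (b.length : Int) + 1) 1) 0

-- ===== PORT B =====
-- Source B's loop: rem counts the remaining iterations of 'for i in range(n-m+1)'; i, the rolling
-- window sum and the counter are the loop state.  a[i:i+m] (0 ≤ i) is (a.drop i).take m and the
-- guarded accesses a[i+m], a[i] (in range by the guard i+m<n) are List.getD — exact here.
def findSublistLoopB (a b : List Int) (order target : Int) (n m : Nat) :
    Nat → Nat → Int → Int → Int
  | 0, _, _, _ => -1
  | rem + 1, i, window, counter =>
      if window = target ∧ (a.drop i).take m = b then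
        if counter + 1 > order then (i : Int)
        else findSublistLoopB a b order target n m rem (i + 1)
              (if i + m < n then window + a.getD (i + m) 0 - a.getD i 0 else window)
              (counter + 1)
      else findSublistLoopB a b order target n m rem (i + 1)
              (if i + m < n then window + a.getD (i + m) 0 - a.getD i 0 else window)
              counter

def find_sublist_alt (a : List Int) (b : List Int) (order : Int) : Int :=
  if b = [] then -1
  else
    let n := a.length
    let m := b.length
    if m > n then -1
    else findSublistLoopB a b order b.sum n m (n - m + 1) 0 (a.take m).sum 0

-- ===== PRECONDITION & SPEC =====
def Spec_find_sublist (a : List Int) (b : List Int) (order : Int) (out : Int) : Prop := out = find_sublist_alt a b order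
instance (a : List Int) (b : List Int) (order : Int) (out : Int) : Decidable (Spec_find_sublist a b order out) := by unfold Spec_find_sublist; infer_instance

-- ===== CLAIM (what is proved, stated in full; the proofs are below) =====
def Claim_equal_find_sublist : Prop := ∀ (a : List Int) (b : List Int) (order : Int), Dom_find_sublist a b order → Spec_find_sublist a b order (find_sublist a b order)

-- ===== LEMMAS AND PROOFS =====

lemma windowSum_step (a : List Int) (m i : Nat) (hm : 1 ≤ m) (h : i + m < a.length) :
    ((a.drop i).take m).sum + a.getD (i + m) 0 - a.getD i 0
      = ((a.drop (i + 1)).take m).sum := by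
  obtain ⟨m', rfl⟩ : ∃ m', m = m' + 1 := ⟨m - 1, by omega⟩
  have hi : i < a.length := by omega
  have hdrop : a.drop i = a[i] :: a.drop (i + 1) := List.drop_eq_getElem_cons hi
  have h2 : m' < (a.drop (i+1)).length := by simp [List.length_drop]; omega
  have htake : (a.drop (i+1)).take (m' + 1) = (a.drop (i+1)).take m' ++ [(a.drop (i+1))[m']] := by
    rw [List.take_add_one]
    simp [List.getElem?_eq_getElem h2]
  have hg : (a.drop (i+1))[m'] = a[i + (m'+1)] := by
    rw [List.getElem_drop]
    congr 1; omega
  rw [hdrop, List.take_succ_cons, htake, hg]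
  simp only [List.sum_cons, List.sum_append, List.sum_nil, List.getD_eq_getElem?_getD,
    List.getElem?_eq_getElem hi, List.getElem?_eq_getElem h, Option.getD_some]
  ring

lemma loop_eq (a b : List Int) (order : Int) (hb : b ≠ []) (hmn : b.length ≤ a.length) :
    ∀ (rem i : Nat) (window counter : Int),
      i + rem = a.length - b.length + 1 →
      (i ≤ a.length - b.length → window = ((a.drop i).take b.length).sum) →
      findSublistLoopA a b order
          (PySem.List.pyRange (i : Int) ((a.length - b.length + 1 : Nat) : Int) 1) counter
        = findSublistLoopB a b order b.sum a.length b.length rem i window counter := by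
  intro rem
  induction rem with
  | zero =>
      intro i window counter hsum _
      rw [PySem.List.pyRange_one]
      have h0 : a.length - b.length + 1 - i = 0 := by omega
      simp [h0, findSublistLoopA, findSublistLoopB]
  | succ rem ih =>
      intro i window counter hsum hw
      have hlt : (i : Int) < ((a.length - b.length + 1 : Nat) : Int) := by omega
      rw [PySem.List.pyRange_one_cons hlt]
      have hile : i ≤ a.length - b.length := by omega
      have hwin := hw hile
      have hm1 : 1 ≤ b.length := List.length_pos_of_ne_nil hb
      simp only [findSublistLoopA, findSublistLoopB, PySem.List.slice_natCast_add]
      have hcast : ((i : Int) + 1) = ((i + 1 : Nat) : Int) := by push_cast; ring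
      have hrec : ∀ c : Int,
          findSublistLoopA a b order
            (PySem.List.pyRange ((i : Int) + 1) ((a.length - b.length + 1 : Nat) : Int) 1) c
          = findSublistLoopB a b order b.sum a.length b.length rem (i + 1)
              (if i + b.length < a.length then window + a.getD (i + b.length) 0 - a.getD i 0 else window) c := by
        intro c
        rw [hcast]
        apply ih
        · omega
        · intro h'
          have hin : i + b.length < a.length := by omega
          rw [if_pos hin, hwin]
          exact windowSum_step a b.length i hm1 hin
      by_cases hc : (a.drop i).take b.length = b
      · have hcond : window = b.sum := by rw [hwin, hc]
        rw [if_pos hc, if_pos (And.intro hcond hc)]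
        by_cases hord : counter + 1 > order
        · rw [if_pos hord, if_pos hord]
        · rw [if_neg hord, if_neg hord]
          exact hrec (counter + 1)
      · rw [if_neg hc, if_neg (by tauto)]
        exact hrec counter

-- ===== VERDICT (by name: the statement is the Claim_ definition above) =====
theorem find_sublist_spec : Claim_equal_find_sublist := by
  intro a b order _
  unfold Spec_find_sublist find_sublist find_sublist_alt
  by_cases hb : b = []
  · simp [hb]
  · rw [if_neg hb, if_neg hb]
    by_cases hmn : b.length > a.length
    · rw [if_pos hmn, PySem.List.pyRange_one]
      have h0 : ((a.length : Int) - (b.length : Int) + 1).toNat = 0 := by omega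
      simp [h0, findSublistLoopA]
    · rw [if_neg hmn]
      have hle : b.length ≤ a.length := by omega
      have hcast : ((a.length : Int) - (b.length : Int) + 1)
          = ((a.length - b.length + 1 : Nat) : Int) := by omega
      have h0 : (0 : Int) = ((0 : Nat) : Int) := rfl
      rw [hcast, h0]
      have := loop_eq a b order hb hle (a.length - b.length + 1) 0 (a.take b.length).sum 0
        (by omega) (by intro _; simp)
      simpa using this
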